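-- pv_equiv track=rewrite | github.com/zhengwang721/ASF | tools/project_generator/asf/database.py | _format_description_text
-- ===== SOURCE A (Python) =====
-- def _format_description_text(text):
-- 	"""
-- 	Clean the description text of "formatting artifacts" from the
-- 	ASF XML:
-- 	- remove whitespace at start and end of all lines
-- 	- replace empty lines with a single newline
-- 	- concatenate non-empty lines with space as separator
-- 	"""
-- 	if text == None:
-- 		return None
--
-- 	formatted = ''
-- 	lines = [l.strip() for l in text.strip().splitlines()]
--
-- 	format_lines = []
-- 	new_line = True
-- 	for l in lines:
-- 		if l == '':
-- 			format_lines.append('\n')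
-- 			new_line = True
-- 		else:
-- 			if new_line == False:
-- 				format_lines.append(' ')
-- 			format_lines.append(l)
-- 			new_line = False
--
-- 	return ''.join(format_lines)
-- ===== SOURCE B (Python) =====
-- def _format_description_text(text):
-- 	if text is None:
-- 		return None
--
-- 	lines = [l.strip() for l in text.strip().splitlines()]
--
-- 	pieces = []
-- 	rest = lines
-- 	while rest:
-- 		k = 0
-- 		if rest[0] == '':
-- 			while k < len(rest) and rest[k] == '':
-- 				k += 1
-- 			pieces.append('\n' * k)
-- 		else:
-- 			while k < len(rest) and rest[k] != '':
-- 				k += 1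
-- 			pieces.append(' '.join(rest[:k]))
-- 		rest = rest[k:]
-- 	return ''.join(pieces)
-- ===== Notes on version B (the rewrite author's own statement) =====
-- stated objective: alternative
-- what changed: Replaces the per-line new_line flag and per-token separator insertion with run-grouping: the stripped lines are split into maximal runs of empty/non-empty lines, each empty run becomes that many newlines and each non-empty run one space-joined string, then the pieces are concatenated.
import Mathlib
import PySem

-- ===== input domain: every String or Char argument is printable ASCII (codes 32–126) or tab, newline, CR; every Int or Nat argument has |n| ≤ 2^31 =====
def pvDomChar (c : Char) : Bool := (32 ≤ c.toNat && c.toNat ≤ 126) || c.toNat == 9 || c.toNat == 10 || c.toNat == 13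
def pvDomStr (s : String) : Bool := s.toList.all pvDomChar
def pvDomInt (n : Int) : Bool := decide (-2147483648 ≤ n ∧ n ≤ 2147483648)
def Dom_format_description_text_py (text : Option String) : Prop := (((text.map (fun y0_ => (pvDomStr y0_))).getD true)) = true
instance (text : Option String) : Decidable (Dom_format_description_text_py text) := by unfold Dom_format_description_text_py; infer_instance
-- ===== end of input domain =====

-- B replaces A's new_line flag / per-token separator insertion with run-grouping plus per-run joins (alternative decomposition, same cost).

-- ===== PORT A =====
-- the 'for l in lines' loop with state (format_lines, new_line)
def pvALoop : List String → List String → Bool → List String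
  | [], format_lines, _ => format_lines
  | l :: ls, format_lines, new_line =>
    if l == "" then
      pvALoop ls (format_lines ++ ["\n"]) true
    else
      pvALoop ls ((if new_line == false then format_lines ++ [" "] else format_lines) ++ [l]) false

def format_description_text_py (text : Option String) : Option String :=
  match text with
  | none => none
  | some t =>
    let lines := (PySem.Str.splitlines (PySem.Str.strip t)).map PySem.Str.strip
    some (PySem.Str.join "" (pvALoop lines [] true))

-- ===== PORT B =====
-- the 'while rest' run-grouping loop: each run of empty lines → that many '\n',
-- each run of non-empty lines → ' '.join(run); the inner counting while-loops are takeWhile/dropWhile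
def pvBGroups : List String → List String
  | [] => []
  | l :: ls =>
    if l == "" then
      let run := (l :: ls).takeWhile (fun x => x == "")
      String.ofList (PySem.List.pyRepeat ['\n'] run.length) :: pvBGroups ((l :: ls).dropWhile (fun x => x == ""))
    else
      let run := (l :: ls).takeWhile (fun x => x != "")
      PySem.Str.join " " run :: pvBGroups ((l :: ls).dropWhile (fun x => x != ""))
  termination_by ls => ls.length
  decreasing_by
    all_goals simp [List.dropWhile_cons, *]
    · exact List.length_dropWhile_le _ ls
    · rw [if_neg (by simp_all)]
      exact List.length_dropWhile_le _ ls

def format_description_text_py_alt (text : Option String) : Option String :=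
  match text with
  | none => none
  | some t =>
    let lines := (PySem.Str.splitlines (PySem.Str.strip t)).map PySem.Str.strip
    some (PySem.Str.join "" (pvBGroups lines))

-- ===== PRECONDITION & SPEC =====
def Spec_format_description_text_py (text : Option String) (out : Option String) : Prop := out = format_description_text_py_alt text
instance (text : Option String) (out : Option String) : Decidable (Spec_format_description_text_py text out) := by unfold Spec_format_description_text_py; infer_instance

-- ===== CLAIM (what is proved, stated in full; the proofs are below) =====
def Claim_equal_format_description_text_py : Prop := ∀ (text : Option String), Dom_format_description_text_py text → Spec_format_description_text_py text (format_description_text_py text)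

-- ===== LEMMAS AND PROOFS =====
-- flattened character content of a list of string pieces
def pvFlat (xs : List String) : List Char := (xs.map String.toList).flatten

lemma pvFlat_cons (x : String) (xs : List String) :
    pvFlat (x :: xs) = x.toList ++ pvFlat xs := by simp [pvFlat]

lemma pvJoinNil (xs : List String) :
    PySem.Chars.join [] (xs.map String.toList) = pvFlat xs := by
  induction xs with
  | nil => simp [pvFlat, PySem.Chars.join_nil]
  | cons a xs ih =>
    cases xs with
    | nil => simp [pvFlat, PySem.Chars.join_singleton]
    | cons b xs =>
      rw [List.map_cons, List.map_cons, PySem.Chars.join_cons_cons,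
        ← List.map_cons, ih, pvFlat_cons]
      simp [pvFlat_cons]

lemma pvALoop_acc (ls : List String) (fl : List String) (nl : Bool) :
    pvALoop ls fl nl = fl ++ pvALoop ls [] nl := by
  induction ls generalizing fl nl with
  | nil => simp [pvALoop]
  | cons l ls ih =>
    by_cases h : l = ""
    · rw [show pvALoop (l :: ls) fl nl = pvALoop ls (fl ++ ["\n"]) true by simp [pvALoop, h],
        show pvALoop (l :: ls) [] nl = pvALoop ls ["\n"] true by simp [pvALoop, h],
        ih, ih ["\n"] true, List.append_assoc]
    · cases nl with
      | true =>
        rw [show pvALoop (l :: ls) fl true = pvALoop ls (fl ++ [l]) false by simp [pvALoop, h],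
          show pvALoop (l :: ls) [] true = pvALoop ls [l] false by simp [pvALoop, h],
          ih, ih [l] false, List.append_assoc]
      | false =>
        rw [show pvALoop (l :: ls) fl false = pvALoop ls (fl ++ [" "] ++ [l]) false by simp [pvALoop, h],
          show pvALoop (l :: ls) [] false = pvALoop ls ([" "] ++ [l]) false by simp [pvALoop, h],
          ih, ih ([" "] ++ [l]) false]
        simp

-- the leading separator B's non-empty-run join contributes when A's flag is false
def pvSep (ls : List String) : List Char :=
  match ls with
  | [] => []
  | l :: _ => if l = "" then [] else [' ']

lemma pvB_empty_cons (ls : List String) :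
    pvFlat (pvBGroups ("" :: ls)) = '\n' :: pvFlat (pvBGroups ls) := by
  cases ls with
  | nil => simp [pvBGroups, pvFlat, PySem.List.pyRepeat_singleton]
  | cons b ls =>
    by_cases hb : b = ""
    · rw [pvBGroups, pvBGroups]
      have ht : ((((List.takeWhile (fun x => x == "") ls).length : Int) + 1 + 1)).toNat
          = (List.takeWhile (fun x => x == "") ls).length + 2 := by omega
      simp [hb, pvFlat, PySem.List.pyRepeat_singleton, ht, List.replicate_succ]
    · rw [pvBGroups]
      simp [hb, pvFlat, PySem.List.pyRepeat_singleton]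

lemma pvB_nonempty_cons (l : String) (ls : List String) (h : ¬ l = "") :
    pvFlat (pvBGroups (l :: ls)) = l.toList ++ pvSep ls ++ pvFlat (pvBGroups ls) := by
  cases ls with
  | nil =>
    simp [pvBGroups, h, pvFlat, pvSep, PySem.Str.join,
      PySem.Chars.join_singleton]
  | cons b ls =>
    by_cases hb : b = ""
    · rw [pvBGroups]
      simp [h, hb, pvFlat, pvSep, PySem.Str.join, PySem.Chars.join_singleton]
    · rw [pvBGroups, pvBGroups]
      simp only [List.takeWhile_cons, List.dropWhile_cons]
      simp [h, hb, pvFlat, pvSep, PySem.Str.join, PySem.Chars.join_cons_cons]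

lemma pvMain (ls : List String) :
    pvFlat (pvALoop ls [] true) = pvFlat (pvBGroups ls) ∧
    pvFlat (pvALoop ls [] false) = pvSep ls ++ pvFlat (pvBGroups ls) := by
  induction ls with
  | nil => simp [pvALoop, pvBGroups, pvFlat, pvSep]
  | cons l ls ih =>
    by_cases h : l = ""
    · subst h
      have hstep : ∀ nl : Bool, pvFlat (pvALoop ("" :: ls) [] nl) = '\n' :: pvFlat (pvALoop ls [] true) := by
        intro nl
        rw [show pvALoop ("" :: ls) [] nl = pvALoop ls ["\n"] true by cases nl <;> simp [pvALoop]]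
        rw [pvALoop_acc, List.singleton_append, pvFlat_cons]
        rfl
      constructor
      · rw [hstep, ih.1, pvB_empty_cons]
      · rw [hstep, ih.1, pvB_empty_cons]; simp [pvSep]
    · have ha : pvALoop (l :: ls) [] true = l :: pvALoop ls [] false := by
        rw [show pvALoop (l :: ls) [] true = pvALoop ls [l] false by simp [pvALoop, h],
          pvALoop_acc]
        rfl
      have hb : pvALoop (l :: ls) [] false = " " :: l :: pvALoop ls [] false := by
        rw [show pvALoop (l :: ls) [] false = pvALoop ls [" ", l] false by simp [pvALoop, h],
          pvALoop_acc]
        rfl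
      constructor
      · rw [ha, pvB_nonempty_cons l ls h, pvFlat_cons, ih.2, List.append_assoc]
      · rw [hb, pvB_nonempty_cons l ls h, pvFlat_cons, pvFlat_cons, ih.2]
        simp [pvSep, h]

lemma pvJoinEq (ls : List String) :
    PySem.Str.join "" (pvALoop ls [] true) = PySem.Str.join "" (pvBGroups ls) := by
  unfold PySem.Str.join
  congr 1
  rw [show ("" : String).toList = [] from rfl, pvJoinNil, pvJoinNil]
  exact (pvMain ls).1

-- ===== VERDICT (by name: the statement is the Claim_ definition above) =====
theorem format_description_text_py_spec : Claim_equal_format_description_text_py := by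
  intro text _
  unfold Spec_format_description_text_py format_description_text_py format_description_text_py_alt
  cases text with
  | none => rfl
  | some t => simp [pvJoinEq]
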